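-- pv_equiv track=rewrite | github.com/shohoku11wrj/haoqiyou | serialize_gpx.py | _encode_number
-- ===== SOURCE A (Python) =====
-- def _encode_number(value: int) -> str:
--     value = ~(value << 1) if value < 0 else value << 1
--     chunk_chars: list[str] = []
--     while value >= 0x20:
--         chunk_chars.append(chr((0x20 | (value & 0x1F)) + 63))
--         value >>= 5
--     chunk_chars.append(chr(value + 63))
--     return "".join(chunk_chars)
-- ===== SOURCE B (Python) =====
-- def _encode_number(value: int) -> str:
--     value = ~(value << 1) if value < 0 else value << 1
--     n = max(1, (value.bit_length() + 4) // 5)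
--     return "".join(
--         chr((0x20 | ((value >> (5 * i)) & 0x1F)) + 63) if i < n - 1
--         else chr((value >> (5 * (n - 1))) + 63)
--         for i in range(n)
--     )
-- ===== Notes on version B (the rewrite author's own statement) =====
-- stated objective: alternative
-- what changed: B replaces A's while-loop that consumes the value one chunk at a time by an up-front closed-form chunk count derived from the value's bit length, then emits each chunk by its shift index in a single comprehension.
import Mathlib
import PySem

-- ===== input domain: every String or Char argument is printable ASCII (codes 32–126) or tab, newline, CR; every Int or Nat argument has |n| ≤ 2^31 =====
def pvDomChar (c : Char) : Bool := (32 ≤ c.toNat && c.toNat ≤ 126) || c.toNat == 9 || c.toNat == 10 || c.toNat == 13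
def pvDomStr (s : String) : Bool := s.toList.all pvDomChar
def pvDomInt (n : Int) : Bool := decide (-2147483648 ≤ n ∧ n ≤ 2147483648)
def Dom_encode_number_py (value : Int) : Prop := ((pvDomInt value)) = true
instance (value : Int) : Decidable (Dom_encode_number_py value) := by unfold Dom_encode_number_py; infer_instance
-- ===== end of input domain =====

-- B computes the chunk count up front via bit_length and maps each chunk by index
-- instead of A's while-loop that shifts the value until exhausted (alternative decomposition, same cost).


-- ===== PORT A =====
-- Python's `value << 1` on int is exactly `value * 2`, and `~x` is `-x - 1`;
-- the result is always ≥ 0, so `.toNat` below is exact (no clamping can occur).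
def pvZigzag (value : Int) : Nat :=
  (if value < 0 then -(value * 2) - 1 else value * 2).toNat

-- the while-loop of A: emit a continuation chunk while value ≥ 0x20, then the final chunk
def encAChunks (v : Nat) : List Char :=
  if h : 0x20 ≤ v then
    Char.ofNat ((0x20 ||| (v &&& 0x1F)) + 63) :: encAChunks (v >>> 5)
  else [Char.ofNat (v + 63)]
termination_by v
decreasing_by
  simp only [Nat.shiftRight_eq_div_pow]
  exact Nat.div_lt_self (by omega) (by norm_num)

def encode_number_py (value : Int) : String :=
  String.mk (encAChunks (pvZigzag value))

-- ===== PORT B =====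
-- Python's value.bit_length() on a nonnegative int is exactly Nat.size
def nChunks (v : Nat) : Nat := max 1 ((Nat.size v + 4) / 5)

def encBChunk (v n i : Nat) : Char :=
  if i < n - 1 then Char.ofNat ((0x20 ||| ((v >>> (5 * i)) &&& 0x1F)) + 63)
  else Char.ofNat ((v >>> (5 * (n - 1))) + 63)

def encode_number_py_alt (value : Int) : String :=
  let v := pvZigzag value
  let n := nChunks v
  String.mk ((List.range n).map (encBChunk v n))

-- ===== PRECONDITION & SPEC =====
def Spec_encode_number_py (value : Int) (out : String) : Prop := out = encode_number_py_alt value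
instance (value : Int) (out : String) : Decidable (Spec_encode_number_py value out) := by unfold Spec_encode_number_py; infer_instance

-- ===== CLAIM (what is proved, stated in full; the proofs are below) =====
def Claim_equal_encode_number_py : Prop := ∀ (value : Int), Dom_encode_number_py value → Spec_encode_number_py value (encode_number_py value)

-- ===== LEMMAS AND PROOFS =====

-- shifting a value ≥ 32 right by 5 drops its bit length by exactly 5
lemma size_shiftRight5 (v : Nat) (h : 32 ≤ v) : Nat.size (v >>> 5) = Nat.size v - 5 := by
  have hs6 : 6 ≤ Nat.size v := Nat.lt_size.mpr (by norm_num; omega)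
  have hlo : 2 ^ (Nat.size v - 1) ≤ v := Nat.lt_size.mp (by omega)
  have hhi : v < 2 ^ Nat.size v := Nat.lt_size_self v
  rw [Nat.shiftRight_eq_div_pow]
  have hup : Nat.size (v / 2 ^ 5) ≤ Nat.size v - 5 := by
    rw [Nat.size_le, Nat.div_lt_iff_lt_mul (by norm_num), ← Nat.pow_add]
    have : Nat.size v - 5 + 5 = Nat.size v := by omega
    rwa [this]
  have hdn : Nat.size v - 6 < Nat.size (v / 2 ^ 5) := by
    rw [Nat.lt_size, Nat.le_div_iff_mul_le (by norm_num), ← Nat.pow_add]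
    have : Nat.size v - 6 + 5 = Nat.size v - 1 := by omega
    rwa [this]
  omega

lemma encA_eq_range (v : Nat) :
    encAChunks v = (List.range (nChunks v)).map (encBChunk v (nChunks v)) := by
  induction v using Nat.strong_induction_on with
  | _ v ih =>
    rw [encAChunks]
    by_cases h : 0x20 ≤ v
    · rw [dif_pos h]
      have hs6 : 6 ≤ Nat.size v := Nat.lt_size.mpr (by norm_num; omega)
      have hsize : Nat.size (v >>> 5) = Nat.size v - 5 := size_shiftRight5 v h
      have hn2 : 2 ≤ nChunks v := by unfold nChunks; omega
      have hn' : nChunks (v >>> 5) = nChunks v - 1 := by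
        unfold nChunks; rw [hsize]; omega
      have hlt : v >>> 5 < v := by
        rw [Nat.shiftRight_eq_div_pow]
        exact Nat.div_lt_self (by omega) (by norm_num)
      rw [ih (v >>> 5) hlt, hn']
      have hrange : nChunks v = (nChunks v - 1) + 1 := by omega
      rw [hrange, List.range_succ_eq_map, List.map_cons, List.map_map]
      congr 1
      · unfold encBChunk
        rw [if_pos (by omega)]
        simp
      · refine List.map_congr_left ?_
        intro j hj
        rw [List.mem_range] at hj
        unfold encBChunk
        simp only [Function.comp_apply, Nat.add_sub_cancel, Nat.succ_eq_add_one]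
        have hsh : ∀ k : Nat, v >>> 5 >>> (5 * k) = v >>> (5 * (k + 1)) := by
          intro k
          rw [← Nat.shiftRight_add]
          congr 1
          omega
        by_cases hb : j < nChunks v - 1 - 1
        · rw [if_pos hb, if_pos (by omega), hsh]
        · rw [if_neg hb, if_neg (by omega), hsh]
          congr 3
          omega
    · rw [dif_neg h]
      have hn1 : nChunks v = 1 := by
        have : Nat.size v ≤ 5 := Nat.size_le.mpr (by norm_num; omega)
        unfold nChunks; omega
      rw [hn1]
      simp [encBChunk]

-- ===== VERDICT (by name: the statement is the Claim_ definition above) =====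
theorem encode_number_py_spec : Claim_equal_encode_number_py := by
  intro value _
  unfold Spec_encode_number_py encode_number_py encode_number_py_alt
  rw [encA_eq_range]
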